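-- pv_equiv track=rewrite | github.com/OthmaneWahbi/HMS | Spiders/ecotel_spider.py | replace_letters_with_ascii
-- ===== SOURCE A (Python) =====
-- def replace_letters_with_ascii(text):
--     result = ""
--     for char in text:
--         if char.isalpha():
--             ascii_code = ord(char)
--             result += str(ascii_code)
--         else:
--             result += char
--     return result
-- ===== SOURCE B (Python) =====
-- def replace_letters_with_ascii(text):
--     table = {ord(c): str(ord(c)) for c in set(text) if c.isalpha()}
--     return text.translate(table)
-- ===== Notes on version B (the rewrite author's own statement) =====
-- stated objective: idiomatic
-- what changed: Replaces the per-character branch-and-concatenate loop with a precomputed ord->string translation table over the distinct letters of the text plus a single str.translate call.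
import Mathlib
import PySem

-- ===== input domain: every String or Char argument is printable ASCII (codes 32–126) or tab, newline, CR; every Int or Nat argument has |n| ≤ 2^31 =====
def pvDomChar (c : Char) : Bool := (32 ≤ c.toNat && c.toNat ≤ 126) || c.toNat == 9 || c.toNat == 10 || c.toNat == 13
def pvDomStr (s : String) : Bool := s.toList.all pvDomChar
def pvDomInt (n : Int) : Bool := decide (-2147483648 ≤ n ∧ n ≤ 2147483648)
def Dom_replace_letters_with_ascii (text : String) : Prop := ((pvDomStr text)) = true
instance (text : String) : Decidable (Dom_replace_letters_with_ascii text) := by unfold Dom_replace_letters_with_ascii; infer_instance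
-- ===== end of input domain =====

-- B replaces A's per-character branch-and-concatenate loop with a precomputed
-- ord->string translation table over the distinct letters plus one translate pass (idiomatic).


-- ===== PORT A =====
-- 'result += …' ported over List Char (exact for string concatenation)
def replace_letters_with_ascii (text : String) : String :=
  String.mk (text.toList.foldl
    (fun acc c =>
      if PySem.Chars.isalpha c then
        acc ++ (PySem.Int.toStr (c.toNat : Int)).toList
      else
        acc ++ [c]) [])

-- ===== PORT B =====
-- table = {ord(c): str(ord(c)) for c in set(text) if c.isalpha()}
def pvTable_replace_letters_with_ascii (text : String) : PySem.Dict Int String :=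
  (PySem.Set.ofList text.toList).foldl
    (fun d c =>
      if PySem.Chars.isalpha c then
        d.insert (c.toNat : Int) (PySem.Int.toStr (c.toNat : Int))
      else d)
    PySem.Dict.empty

-- text.translate(table): each char's ordinal is looked up; a hit is replaced by
-- the mapped string, a miss keeps the char (exact for a dict of str values)
def replace_letters_with_ascii_alt (text : String) : String :=
  String.mk (text.toList.flatMap
    (fun c =>
      match (pvTable_replace_letters_with_ascii text).get? (c.toNat : Int) with
      | some s => s.toList
      | none => [c]))

-- ===== PRECONDITION & SPEC =====
def Spec_replace_letters_with_ascii (text : String) (out : String) : Prop := out = replace_letters_with_ascii_alt text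
instance (text : String) (out : String) : Decidable (Spec_replace_letters_with_ascii text out) := by unfold Spec_replace_letters_with_ascii; infer_instance

-- ===== CLAIM (what is proved, stated in full; the proofs are below) =====
def Claim_equal_replace_letters_with_ascii : Prop := ∀ (text : String), Dom_replace_letters_with_ascii text → Spec_replace_letters_with_ascii text (replace_letters_with_ascii text)

-- ===== LEMMAS AND PROOFS =====

-- lookup in the table built by folding conditional inserts over a char list
theorem pv_get_fold (l : List Char) (d : PySem.Dict Int String) (k : Int) :
    (l.foldl (fun d c =>
        if PySem.Chars.isalpha c then
          d.insert (c.toNat : Int) (PySem.Int.toStr (c.toNat : Int))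
        else d) d).get? k
      = if (∃ c ∈ l, PySem.Chars.isalpha c = true ∧ (c.toNat : Int) = k)
          then some (PySem.Int.toStr k) else d.get? k := by
  induction l generalizing d with
  | nil => simp
  | cons c l ih =>
    simp only [List.foldl_cons, ih]
    by_cases hmem : ∃ c' ∈ l, PySem.Chars.isalpha c' = true ∧ (c'.toNat : Int) = k
    · rw [if_pos hmem, if_pos]
      obtain ⟨c', hc', h1, h2⟩ := hmem
      exact ⟨c', List.mem_cons_of_mem _ hc', h1, h2⟩
    · rw [if_neg hmem]
      by_cases ha : PySem.Chars.isalpha c = true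
      · rw [if_pos ha]
        by_cases hk : (c.toNat : Int) = k
        · rw [if_pos ⟨c, List.mem_cons_self, ha, hk⟩, hk, PySem.Dict.get?_insert_self]
        · rw [if_neg, PySem.Dict.get?_insert_of_ne]
          · intro h; exact hk h.symm
          · rintro ⟨c', hc', h1, h2⟩
            rcases List.mem_cons.mp hc' with rfl | hc'
            · exact hk h2
            · exact hmem ⟨c', hc', h1, h2⟩
      · rw [if_neg ha, if_neg]
        rintro ⟨c', hc', h1, h2⟩
        rcases List.mem_cons.mp hc' with rfl | hc'
        · exact ha h1
        · exact hmem ⟨c', hc', h1, h2⟩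

-- for a character of the text, the table lookup is its ASCII-code string iff it is a letter
theorem pv_table_get (text : String) (c : Char) (hc : c ∈ text.toList) :
    (pvTable_replace_letters_with_ascii text).get? (c.toNat : Int)
      = if PySem.Chars.isalpha c then some (PySem.Int.toStr (c.toNat : Int)) else none := by
  unfold pvTable_replace_letters_with_ascii
  rw [pv_get_fold]
  by_cases ha : PySem.Chars.isalpha c = true
  · rw [if_pos ⟨c, (PySem.Set.mem_ofList _ _).mpr hc, ha, rfl⟩, if_pos ha]
  · rw [if_neg, if_neg ha]
    · simp [PySem.Dict.empty, PySem.Dict.get?]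
    · rintro ⟨c', _, h1, h2⟩
      have hn : c'.toNat = c.toNat := by exact_mod_cast h2
      have : c' = c := Char.ext (UInt32.toNat_inj.mp hn)
      exact ha (this ▸ h1)

theorem replace_letters_with_ascii_spec : Claim_equal_replace_letters_with_ascii := by
  intro text _
  unfold Spec_replace_letters_with_ascii replace_letters_with_ascii replace_letters_with_ascii_alt
  congr 1
  rw [show (fun (acc : List Char) (c : Char) =>
        if PySem.Chars.isalpha c then acc ++ (PySem.Int.toStr (c.toNat : Int)).toList
        else acc ++ [c])
      = (fun acc c => acc ++ (if PySem.Chars.isalpha c then (PySem.Int.toStr (c.toNat : Int)).toList else [c]))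
      from by funext acc c; split <;> rfl]
  rw [PySem.List.foldl_append_eq_flatMap]
  simp only [List.nil_append]
  apply List.flatMap_congr
  intro c hc
  rw [pv_table_get text c hc]
  split <;> rfl
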